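-- pv_equiv track=rewrite | github.com/homebrew9/leetcode_solutions | algorithms/easy/count_odd_letters_from_number.py | countOddLetters
-- ===== SOURCE A (Python) =====
-- from collections import defaultdict
--
-- def countOddLetters(n: int) -> int:
--     hsh = {0: 'zero', 1: 'one', 2: 'two', 3: 'three', 4: 'four', 5: 'five',
--            6: 'six', 7: 'seven', 8: 'eight', 9: 'nine'}
--     cntr = defaultdict(int)
--     while n > 0:
--         q, r = divmod(n, 10)
--         for ch in hsh[r]:
--             cntr[ch] += 1
--         n = q
--     return sum([v % 2 == 1 for v in cntr.values()])
-- ===== SOURCE B (Python) =====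
-- def countOddLetters(n: int) -> int:
--     words = ['zero', 'one', 'two', 'three', 'four', 'five',
--              'six', 'seven', 'eight', 'nine']
--     # pass 1: tally how often each digit value occurs
--     digit_cnt = {}
--     while n > 0:
--         n, r = divmod(n, 10)
--         digit_cnt[r] = digit_cnt.get(r, 0) + 1
--     # pass 2: weight each distinct digit's word by its repetition count
--     letters = {}
--     for d, c in digit_cnt.items():
--         for ch in words[d]:
--             letters[ch] = letters.get(ch, 0) + c
--     return sum(1 for v in letters.values() if v % 2 == 1)
-- ===== Notes on version B (the rewrite author's own statement) =====
-- stated objective: alternative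
-- what changed: Instead of incrementing a letter counter once per letter of every digit occurrence, B first tallies a digit-frequency dict in the extraction loop and then, in a second pass over the at most ten distinct digits, adds each word's letters weighted by that frequency before counting odd totals.
import Mathlib
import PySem

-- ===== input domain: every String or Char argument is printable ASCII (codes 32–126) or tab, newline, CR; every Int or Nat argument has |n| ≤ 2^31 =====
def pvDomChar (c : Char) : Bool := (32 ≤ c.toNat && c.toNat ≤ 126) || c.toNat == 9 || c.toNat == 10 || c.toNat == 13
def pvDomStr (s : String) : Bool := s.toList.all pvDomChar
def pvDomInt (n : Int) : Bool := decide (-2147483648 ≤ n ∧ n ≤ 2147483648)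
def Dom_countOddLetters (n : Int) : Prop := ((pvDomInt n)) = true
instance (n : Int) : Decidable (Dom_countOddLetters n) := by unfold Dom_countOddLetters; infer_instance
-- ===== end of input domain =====

-- B replaces A's per-occurrence letter counting by a digit-frequency tally plus a
-- weighted second pass over the distinct digits (alternative decomposition, same cost).

-- ===== PORT A =====
def pvHsh : PySem.Dict Int String :=
  PySem.Dict.ofList [(0, "zero"), (1, "one"), (2, "two"), (3, "three"), (4, "four"),
    (5, "five"), (6, "six"), (7, "seven"), (8, "eight"), (9, "nine")]

-- A's while loop; `hsh[r]` never raises since r = n % 10 ∈ [0,10), so `getD r ""` never defaults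
def pvLoopA (n : Int) (cntr : PySem.Dict Char Int) : PySem.Dict Char Int :=
  if h : 0 < n then
    pvLoopA (PySem.Int.floordiv n 10)
      ((pvHsh.getD (PySem.Int.mod n 10) "").toList.foldl
        (fun c ch => c.modify ch 0 (· + 1)) cntr)
  else cntr
termination_by n.toNat
decreasing_by
  rw [PySem.Int.floordiv_eq_ediv_of_pos (by omega : (0:Int) < 10)]; omega

def countOddLetters (n : Int) : Int :=
  ((pvLoopA n PySem.Dict.empty).values.map
    (fun v => if PySem.Int.mod v 2 == 1 then (1 : Int) else 0)).sum

-- ===== PORT B =====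
def pvWords : List String :=
  ["zero", "one", "two", "three", "four", "five", "six", "seven", "eight", "nine"]

-- B's first pass: tally of digit-value frequencies (while n > 0)
def pvDigitCnt (n : Int) (dc : PySem.Dict Int Int) : PySem.Dict Int Int :=
  if h : 0 < n then
    pvDigitCnt (PySem.Int.floordiv n 10)
      (dc.insert (PySem.Int.mod n 10) (dc.getD (PySem.Int.mod n 10) 0 + 1))
  else dc
termination_by n.toNat
decreasing_by
  rw [PySem.Int.floordiv_eq_ediv_of_pos (by omega : (0:Int) < 10)]; omega

-- B's second pass over distinct digits; `words[d]` never raises since every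
-- tallied digit is in [0,10), so pyGetD never defaults
def countOddLetters_alt (n : Int) : Int :=
  let dc := pvDigitCnt n PySem.Dict.empty
  let letters := dc.items.foldl
    (fun L p => ((PySem.List.pyGetD pvWords p.1 "").toList).foldl
      (fun L ch => L.insert ch (L.getD ch 0 + p.2)) L)
    PySem.Dict.empty
  ((letters.values.filter (fun v => PySem.Int.mod v 2 == 1)).length : Int)

-- ===== PRECONDITION & SPEC =====
def Spec_countOddLetters (n : Int) (out : Int) : Prop := out = countOddLetters_alt n
instance (n : Int) (out : Int) : Decidable (Spec_countOddLetters n out) := by unfold Spec_countOddLetters; infer_instance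

-- ===== CLAIM (what is proved, stated in full; the proofs are below) =====
def Claim_equal_countOddLetters : Prop := ∀ (n : Int), Dom_countOddLetters n → Spec_countOddLetters n (countOddLetters n)

-- ===== LEMMAS AND PROOFS =====

-- the digit sequence both while loops extract (least-significant first)
def pvDigits (n : Int) : List Int :=
  if h : 0 < n then PySem.Int.mod n 10 :: pvDigits (PySem.Int.floordiv n 10) else []
termination_by n.toNat
decreasing_by
  rw [PySem.Int.floordiv_eq_ediv_of_pos (by omega : (0:Int) < 10)]; omega

theorem pvDigits_mem (n : Int) : ∀ d ∈ pvDigits n, 0 ≤ d ∧ d < 10 := by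
  induction n using pvDigits.induct with
  | case1 n h ih =>
    rw [pvDigits]; simp only [h, dif_pos]
    intro d hd
    rcases List.mem_cons.mp hd with rfl | hd
    · exact ⟨PySem.Int.mod_nonneg _ (by omega), PySem.Int.mod_lt _ (by omega)⟩
    · exact ih d hd
  | case2 n h => rw [pvDigits]; simp [h]

theorem loopA_eq_foldl (n : Int) (c : PySem.Dict Char Int) :
    pvLoopA n c = (pvDigits n).foldl
      (fun c d => ((pvHsh.getD d "").toList).foldl (fun c ch => c.modify ch 0 (· + 1)) c) c := by
  induction n, c using pvLoopA.induct with
  | case1 n c h ih =>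
    rw [pvLoopA, pvDigits]; simp only [h, dif_pos]
    rw [ih, List.foldl_cons]
  | case2 n c h => rw [pvLoopA, pvDigits]; simp [h]

theorem digitCnt_eq_foldl (n : Int) (dc : PySem.Dict Int Int) :
    pvDigitCnt n dc = (pvDigits n).foldl (fun d x => d.insert x (d.getD x 0 + 1)) dc := by
  induction n, dc using pvDigitCnt.induct with
  | case1 n dc h ih =>
    rw [pvDigitCnt, pvDigits]; simp only [h, dif_pos]
    rw [ih, List.foldl_cons]
  | case2 n dc h => rw [pvDigitCnt, pvDigits]; simp [h]

theorem foldl_foldl_flatMap {α β γ : Type} (l : List α) (f : α → List β)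
    (g : γ → β → γ) (init : γ) :
    l.foldl (fun c a => (f a).foldl g c) init = (l.flatMap f).foldl g init := by
  induction l generalizing init with
  | nil => rfl
  | cons a t ih => simp [List.flatMap_cons, List.foldl_append, ih]

theorem sum_map_ite_eq_countP {α : Type} (l : List α) (p : α → Bool) :
    (l.map (fun x => if p x then (1 : Int) else 0)).sum = (l.countP p : Int) := by
  induction l with
  | nil => rfl
  | cons a t ih =>
    by_cases h : p a <;> simp [h, ih] <;> ring

theorem word_eq : ∀ d : Int, 0 ≤ d → d < 10 →
    pvHsh.getD d "" = PySem.List.pyGetD pvWords d "" := by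
  intro d h1 h2
  interval_cases d <;> decide

theorem count_flatMap_sum {α β : Type} [BEq β] (l : List α) (f : α → List β) (ch : β) :
    (((l.flatMap f).count ch : Nat) : Int) = (l.map (fun a => ((f a).count ch : Int))).sum := by
  induction l with
  | nil => rfl
  | cons a t ih => simp [List.flatMap_cons, List.count_append, ih]

theorem inner_getD (w : List Char) (L : PySem.Dict Char Int) (ch : Char) (c : Int) :
    ((w.foldl (fun L ch' => L.insert ch' (L.getD ch' 0 + c)) L)).getD ch 0
      = L.getD ch 0 + (w.count ch : Int) * c := by
  induction w generalizing L with
  | nil => simp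
  | cons a t ih =>
    simp only [List.foldl_cons, ih, List.count_cons]
    rw [PySem.Dict.getD_insert]
    by_cases h : ch = a
    · subst h; simp; ring
    · have hh : ¬ a = ch := fun hh => h hh.symm
      simp [h, hh]

theorem outer_getD (ps : List (Int × Int)) (L : PySem.Dict Char Int) (ch : Char)
    (W : Int → List Char) :
    ((ps.foldl (fun L p => (W p.1).foldl (fun L ch' => L.insert ch' (L.getD ch' 0 + p.2)) L) L)).getD ch 0
      = L.getD ch 0 + (ps.map (fun p => ((W p.1).count ch : Int) * p.2)).sum := by
  induction ps generalizing L with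
  | nil => simp
  | cons p t ih =>
    simp only [List.foldl_cons, ih, inner_getD, List.map_cons, List.sum_cons]
    ring

theorem outer_keys (ps : List (Int × Int)) (L : PySem.Dict Char Int) (W : Int → List Char) :
    ((ps.foldl (fun L p => (W p.1).foldl (fun L ch' => L.insert ch' (L.getD ch' 0 + p.2)) L) L)).keys
      = PySem.Set.update L.keys (ps.flatMap (fun p => W p.1)) := by
  induction ps generalizing L with
  | nil => simp [PySem.Set.update]
  | cons p t ih =>
    simp only [List.foldl_cons, ih, List.flatMap_cons]
    rw [PySem.Dict.keys_foldl_insert]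
    simp [PySem.Set.update, List.foldl_append]

theorem sum_dedup_count (l : List Int) (h : Int → Int) :
    ((PySem.Set.ofList l).map (fun k => h k * (l.count k : Int))).sum = (l.map h).sum := by
  have hnd : (PySem.Set.ofList l).Nodup := PySem.Set.nodup_ofList l
  have hfin : (PySem.Set.ofList l).toFinset = l.toFinset := by
    ext x; simp [List.mem_toFinset, PySem.Set.mem_ofList]
  rw [← List.sum_toFinset _ hnd, hfin, Finset.sum_list_map_count]
  apply Finset.sum_congr rfl
  intro m _
  rw [nsmul_eq_mul, mul_comm]

-- ===== VERDICT (by name: the statement is the Claim_ definition above) =====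
theorem countOddLetters_spec : Claim_equal_countOddLetters := by
  intro n _
  unfold Spec_countOddLetters
  -- notation
  set l := pvDigits n with hl
  have hmem := pvDigits_mem n
  -- the common letter total
  set T : Char → Int :=
    fun ch => (l.map (fun d => (((PySem.List.pyGetD pvWords d "").toList.count ch : Nat) : Int))).sum with hT
  set P : Char → Bool := fun ch => PySem.Int.mod (T ch) 2 == 1 with hP
  -- ===== A's value =====
  set LA := l.flatMap (fun d => (pvHsh.getD d "").toList) with hLA
  have hA : countOddLetters n = ((PySem.Set.ofList LA).countP
      (fun k => PySem.Int.mod ((LA.count k : Nat) : Int) 2 == 1) : Int) := by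
    rw [countOddLetters, loopA_eq_foldl, foldl_foldl_flatMap, ← hl, ← hLA,
      ← PySem.Dict.counter_eq_foldl]
    simp only [PySem.Dict.values, PySem.Dict.items_counter, List.map_map]
    show (List.map (fun k => if (fun k => PySem.Int.mod ((LA.count k : Nat) : Int) 2 == 1) k
        then (1 : Int) else 0) (PySem.Set.ofList LA)).sum = _
    rw [sum_map_ite_eq_countP]
  have hcntA : ∀ ch, ((LA.count ch : Nat) : Int) = T ch := by
    intro ch
    rw [hLA, count_flatMap_sum, hT]
    congr 1
    apply List.map_congr_left
    intro d hd
    rw [word_eq d (hmem d hd).1 (hmem d hd).2]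
  have hA' : countOddLetters n = ((PySem.Set.ofList LA).countP P : Int) := by
    rw [hA]; congr 1
    apply List.countP_congr
    intro ch _
    rw [hcntA ch, hP]
  -- ===== B's value =====
  rw [countOddLetters_alt]
  rw [digitCnt_eq_foldl, ← hl, PySem.Dict.foldl_insert_getD_add_one_eq_counter,
    PySem.Dict.items_counter]
  set ps := (PySem.Set.ofList l).map (fun k => (k, (l.count k : Int))) with hps
  set letters := ps.foldl
    (fun L p => ((PySem.List.pyGetD pvWords p.1 "").toList).foldl
      (fun L ch => L.insert ch (L.getD ch 0 + p.2)) L) PySem.Dict.empty with hletters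
  have hkeys : letters.keys = PySem.Set.update ([] : List Char)
      (ps.flatMap (fun p => (PySem.List.pyGetD pvWords p.1 "").toList)) := by
    rw [hletters, outer_keys ps PySem.Dict.empty (fun d => (PySem.List.pyGetD pvWords d "").toList)]; simp
  have hkeys' : letters.keys
      = PySem.Set.ofList (ps.flatMap (fun p => (PySem.List.pyGetD pvWords p.1 "").toList)) := by
    rw [hkeys, PySem.Set.ofList_eq_foldl, PySem.Set.update]
  have hknd : letters.keys.Nodup := by
    rw [hkeys']; exact PySem.Set.nodup_ofList _
  have hgetD : ∀ ch, letters.getD ch 0 = T ch := by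
    intro ch
    rw [hletters, outer_getD ps PySem.Dict.empty ch (fun d => (PySem.List.pyGetD pvWords d "").toList)]
    rw [PySem.Dict.getD_empty, zero_add, hps, List.map_map]
    have : ((PySem.Set.ofList l).map
        ((fun p : Int × Int => (((PySem.List.pyGetD pvWords p.1 "").toList.count ch : Nat) : Int) * p.2)
          ∘ (fun k => (k, (l.count k : Int))))).sum
        = ((PySem.Set.ofList l).map
            (fun k => (((PySem.List.pyGetD pvWords k "").toList.count ch : Nat) : Int) * (l.count k : Int))).sum := rfl
    rw [this, sum_dedup_count]
  have hB : ((letters.values.filter (fun v => PySem.Int.mod v 2 == 1)).length : Int)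
      = (letters.keys.countP P : Int) := by
    rw [PySem.Dict.values_eq_map_keys letters hknd 0, List.filter_map, List.length_map,
      ← List.countP_eq_length_filter]
    congr 1
    apply List.countP_congr
    intro ch _
    simp only [Function.comp, hgetD ch, hP]
  rw [hB, hA']
  -- ===== the two index sets are permutations of each other =====
  congr 1
  have hndA : (PySem.Set.ofList LA).Nodup := PySem.Set.nodup_ofList _
  have hsame : (PySem.Set.ofList LA).toFinset = letters.keys.toFinset := by
    rw [hkeys']
    ext ch
    simp only [List.mem_toFinset, PySem.Set.mem_ofList, List.mem_flatMap, hLA, hps,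
      List.mem_map]
    constructor
    · rintro ⟨d, hd, hch⟩
      exact ⟨(d, (l.count d : Int)), ⟨d, hd, rfl⟩,
        by rwa [← word_eq d (hmem d hd).1 (hmem d hd).2]⟩
    · rintro ⟨p, ⟨d, hd, rfl⟩, hch⟩
      exact ⟨d, hd, by rwa [word_eq d (hmem d hd).1 (hmem d hd).2]⟩
  exact (List.perm_of_nodup_nodup_toFinset_eq hndA hknd hsame).countP_eq P
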